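-- pv_equiv track=rewrite | github.com/kishoreUdatha/BharatBuild_AI | backend/app/services/learning_quiz_service.py | _select_important_files
-- ===== SOURCE A (Python) =====
-- from typing import Dict, List, Any, Optional
--
-- def _select_important_files(files: List[Dict[str, Any]]) -> List[Dict[str, Any]]:
--     """Select the most important files for quiz generation"""
--     # Priority patterns (higher priority first)
--     priority_patterns = [
--         # Auth/Security
--         'auth', 'security', 'login', 'jwt',
--         # Core logic
--         'service', 'controller', 'handler',
--         # Data
--         'model', 'schema', 'database',
--         # API
--         'endpoint', 'route', 'api',
--         # Frontend core
--         'app.tsx', 'app.jsx', 'main.tsx', 'main.jsx',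
--         # State management
--         'store', 'context', 'reducer',
--         # Components
--         'component',
--     ]
--
--     # Exclude patterns
--     exclude_patterns = [
--         'test', 'spec', '__pycache__', '.git', 'node_modules',
--         'package-lock', 'yarn.lock', '.env', 'readme', 'license',
--         '.md', '.txt', '.json', '.yml', '.yaml', 'config'
--     ]
--
--     def get_priority(file: Dict) -> int:
--         path = file.get('path', '').lower()
--
--         # Exclude non-code files
--         for pattern in exclude_patterns:
--             if pattern in path:
--                 return 999
--
--         # Calculate priority based on patterns
--         for i, pattern in enumerate(priority_patterns):
--             if pattern in path:
--                 return i
--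
--         return 100  # Default priority for other code files
--
--     # Sort by priority
--     sorted_files = sorted(files, key=get_priority)
--
--     # Filter out excluded files
--     return [f for f in sorted_files if get_priority(f) < 999]
-- ===== SOURCE B (Python) =====
-- from typing import Dict, List, Any, Optional
--
-- def _select_important_files(files: List[Dict[str, Any]]) -> List[Dict[str, Any]]:
--     """Select the most important files for quiz generation (sieve: peel off each
--     priority pattern's matches in order; no explicit priority numbers, no sort)."""
--     priority_patterns = [
--         'auth', 'security', 'login', 'jwt',
--         'service', 'controller', 'handler',
--         'model', 'schema', 'database',
--         'endpoint', 'route', 'api',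
--         'app.tsx', 'app.jsx', 'main.tsx', 'main.jsx',
--         'store', 'context', 'reducer',
--         'component',
--     ]
--     exclude_patterns = [
--         'test', 'spec', '__pycache__', '.git', 'node_modules',
--         'package-lock', 'yarn.lock', '.env', 'readme', 'license',
--         '.md', '.txt', '.json', '.yml', '.yaml', 'config'
--     ]
--
--     # Keep only non-excluded files, remembering each lowercased path once.
--     kept = []
--     for f in files:
--         p = f.get('path', '').lower()
--         if not any(e in p for e in exclude_patterns):
--             kept.append((p, f))
--
--     # Sieve: for each pattern in priority order, extract (in input order) the
--     # still-unclaimed files whose path contains it; a file is claimed by the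
--     # first pattern that matches it, i.e. exactly its priority index.
--     out = []
--     for pat in priority_patterns:
--         rest = []
--         for p, f in kept:
--             if pat in p:
--                 out.append(f)
--             else:
--                 rest.append((p, f))
--         kept = rest
--
--     # Whatever no pattern claimed has the default priority and comes last.
--     return out + [f for _, f in kept]
-- ===== Notes on version B (the rewrite author's own statement) =====
-- stated objective: alternative
-- what changed: Replaces sorted(files, key=get_priority) followed by a re-filtering pass (which recomputes get_priority per element) with a pattern sieve: one pass drops excluded files and caches each lowercased path, then each priority pattern in order peels off its still-unclaimed matches in input order, leftovers (default priority) coming last; no priority numbers, no sort.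
import Mathlib
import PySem

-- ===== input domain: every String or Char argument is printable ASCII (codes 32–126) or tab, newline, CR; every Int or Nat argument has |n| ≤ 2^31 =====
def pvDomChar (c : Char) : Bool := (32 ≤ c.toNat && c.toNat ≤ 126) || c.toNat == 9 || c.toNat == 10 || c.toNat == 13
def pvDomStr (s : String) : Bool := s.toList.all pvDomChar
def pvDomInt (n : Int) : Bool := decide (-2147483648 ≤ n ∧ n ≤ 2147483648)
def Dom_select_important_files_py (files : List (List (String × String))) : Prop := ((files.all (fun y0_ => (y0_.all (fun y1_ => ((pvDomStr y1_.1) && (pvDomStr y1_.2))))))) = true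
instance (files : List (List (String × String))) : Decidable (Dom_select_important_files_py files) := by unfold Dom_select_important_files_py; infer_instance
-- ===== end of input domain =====

-- B replaces A's sort-then-refilter by a pattern sieve: one exclude pass, then one pass per priority
-- pattern peeling off its matches in input order; return value only, neither program mutates its input.

-- shared module constants (textually identical lists in A's and B's Python)
def pvPriorityPatterns : List String :=
  ["auth", "security", "login", "jwt",
   "service", "controller", "handler",
   "model", "schema", "database",
   "endpoint", "route", "api",
   "app.tsx", "app.jsx", "main.tsx", "main.jsx",
   "store", "context", "reducer",
   "component"]

def pvExcludePatterns : List String :=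
  ["test", "spec", "__pycache__", ".git", "node_modules",
   "package-lock", "yarn.lock", ".env", "readme", "license",
   ".md", ".txt", ".json", ".yml", ".yaml", "config"]

-- file.get('path', '').lower()
def pvPathOf (f : List (String × String)) : String :=
  PySem.Str.lower ((PySem.Dict.ofList f).getD "path" "")

-- any(e in p for e in exclude_patterns)
def pvExcl (p : String) : Bool :=
  pvExcludePatterns.any (fun e => PySem.Str.isIn e p)

-- ===== PORT A =====
-- get_priority(file): first matching exclude pattern → 999; else index of first matching priority pattern; else 100
def pvGetPriority (file : List (String × String)) : Int :=
  let path := pvPathOf file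
  if pvExcl path then 999
  else
    match (PySem.List.enumerate pvPriorityPatterns).find? (fun p => PySem.Str.isIn p.2 path) with
    | some (i, _) => i
    | none => 100

def select_important_files_py (files : List (List (String × String))) : List (List (String × String)) :=
  let sorted_files := PySem.List.sorted files pvGetPriority
  sorted_files.filter (fun f => decide (pvGetPriority f < 999))

-- ===== PORT B =====
def select_important_files_py_alt (files : List (List (String × String))) : List (List (String × String)) :=
  -- kept = [(lowercased path, f)] for the non-excluded files, in input order
  let kept := files.foldl
    (fun ks f =>
      let p := pvPathOf f
      if pvExcl p then ks else ks ++ [(p, f)]) []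
  -- sieve: one pass per priority pattern, moving its matches to out and keeping the rest
  let s := pvPriorityPatterns.foldl
    (fun (s : List (List (String × String)) × List (String × List (String × String))) pat =>
      let t := s.2.foldl
        (fun (t : List (List (String × String)) × List (String × List (String × String))) q =>
          if PySem.Str.isIn pat q.1 then (t.1 ++ [q.2], t.2) else (t.1, t.2 ++ [q]))
        ([], [])
      (s.1 ++ t.1, t.2))
    ([], kept)
  s.1 ++ s.2.map (fun q => q.2)

-- ===== PRECONDITION & SPEC =====
def Spec_select_important_files_py (files : List (List (String × String))) (out : List (List (String × String))) : Prop := out = select_important_files_py_alt files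
instance (files : List (List (String × String))) (out : List (List (String × String))) : Decidable (Spec_select_important_files_py files out) := by unfold Spec_select_important_files_py; infer_instance

-- ===== CLAIM (what is proved, stated in full; the proofs are below) =====
def Claim_equal_select_important_files_py : Prop := ∀ (files : List (List (String × String))), Dom_select_important_files_py files → Spec_select_important_files_py files (select_important_files_py files)

-- ===== LEMMAS AND PROOFS =====

-- the possible non-excluded priorities, ascending (0 .. 20, then the default 100)
def pvK : List Int := PySem.List.pyRange 0 (Int.ofNat pvPriorityPatterns.length) 1 ++ [100]

-- the bucket for priority k, in input order
def pvBucket (files : List (List (String × String))) (k : Int) : List (List (String × String)) :=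
  files.filter (fun f => decide (pvGetPriority f = k))

lemma pvK_sorted : (pvK ++ [999]).Pairwise (· < ·) := by decide

lemma pvK_lt : ∀ k ∈ pvK, k < 999 := by decide

lemma pvPriority_mem (f : List (String × String)) :
    pvGetPriority f = 999 ∨ pvGetPriority f ∈ pvK := by
  unfold pvGetPriority
  dsimp only
  split
  · exact Or.inl rfl
  · right
    split
    · rename_i i pat hfind
      have hm : (i, pat) ∈ PySem.List.enumerate pvPriorityPatterns :=
        List.mem_of_find?_eq_some hfind
      have hmi : i ∈ (PySem.List.enumerate pvPriorityPatterns).map (fun x => x.1) :=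
        List.mem_map_of_mem hm
      rw [PySem.List.map_fst_enumerate] at hmi
      have h21 : (0:Int) ≤ i ∧ i < 21 := by
        simpa [pvPriorityPatterns] using PySem.List.mem_pyRange_one.1 hmi
      unfold pvK
      rw [List.mem_append, PySem.List.mem_pyRange_one]
      left
      exact ⟨h21.1, by simpa [pvPriorityPatterns] using h21.2⟩
    · decide

lemma insertBy_cons {α : Type} (before : α → α → Bool) (x y : α) (ys : List α) :
    PySem.List.insertBy before x (y :: ys) =
      if before x y then x :: y :: ys else y :: PySem.List.insertBy before x ys := by
  simp [PySem.List.insertBy]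

lemma insertBy_append_not_before {α : Type} (before : α → α → Bool) (x : α) (A B : List α)
    (hA : ∀ a ∈ A, before x a = false) :
    PySem.List.insertBy before x (A ++ B) = A ++ PySem.List.insertBy before x B := by
  induction A with
  | nil => simp
  | cons a A ih =>
      simp only [List.cons_append, insertBy_cons, hA a (by simp)]
      simp only [Bool.false_eq_true, if_false]
      rw [ih (fun a ha => hA a (by simp [ha]))]

lemma insertBy_all_before {α : Type} (before : α → α → Bool) (x : α) (B : List α)
    (hB : ∀ b ∈ B, before x b = true) :
    PySem.List.insertBy before x B = x :: B := by
  cases B with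
  | nil => rfl
  | cons b B => simp [insertBy_cons, hB b (by simp)]

lemma flatMap_congr_mem {α β : Type} (l : List α) (g h : α → List β)
    (H : ∀ a ∈ l, g a = h a) : l.flatMap g = l.flatMap h := by
  induction l with
  | nil => rfl
  | cons a l ih =>
      simp only [List.flatMap_cons, H a (by simp), ih (fun a ha => H a (by simp [ha]))]

-- inserting x (priority p) into the concatenation of ascending buckets appends it to bucket p
lemma pv_flat_insert (x : List (String × String)) (p : Int) (hp : pvGetPriority x = p)
    (ks : List Int) (hmem : p ∈ ks) (hs : ks.Pairwise (· < ·))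
    (g : Int → List (List (String × String)))
    (hg : ∀ k ∈ ks, ∀ a ∈ g k, pvGetPriority a = k) :
    PySem.List.insertBy (fun a b => decide (pvGetPriority a < pvGetPriority b)) x (ks.flatMap g)
      = ks.flatMap (fun k => g k ++ if p = k then [x] else []) := by
  induction ks with
  | nil => simp at hmem
  | cons k ks ih =>
      have hklt : ∀ k' ∈ ks, k < k' := fun k' h => (List.pairwise_cons.1 hs).1 k' h
      have hstail : ks.Pairwise (· < ·) := (List.pairwise_cons.1 hs).2
      by_cases hpk : p = k
      · subst hpk
        rw [List.flatMap_cons,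
          insertBy_append_not_before _ _ _ _
            (fun a ha => by simp [hp, hg p (by simp) a ha]),
          insertBy_all_before _ _ _
            (fun b hb => by
              rcases List.mem_flatMap.1 hb with ⟨k', hk', hbk⟩
              simp [hp, hg k' (by simp [hk']) b hbk, hklt k' hk'])]
        rw [List.flatMap_cons]
        rw [flatMap_congr_mem ks (fun k' => g k' ++ if p = k' then [x] else []) g
          (fun k' hk' => by
            have : p ≠ k' := by have := hklt k' hk'; omega
            simp [this])]
        simp
      · have hmem' : p ∈ ks := by
          rcases List.mem_cons.1 hmem with h | h
          · exact absurd h hpk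
          · exact h
        rw [List.flatMap_cons,
          insertBy_append_not_before _ _ _ _
            (fun a ha => by
              have hak : pvGetPriority a = k := hg k (by simp) a ha
              have : k < p := hklt p hmem'
              simp [hp, hak]; omega),
          ih hmem' hstail (fun k' hk' a ha => hg k' (by simp [hk']) a ha)]
        rw [List.flatMap_cons]
        simp [hpk]

-- the stable sort of files by priority is the ascending concatenation of its buckets
lemma pv_sorted_char (files : List (List (String × String))) :
    PySem.List.sorted files pvGetPriority
      = (pvK ++ [999]).flatMap (pvBucket files) := by
  rw [PySem.List.sorted_eq_foldl_insertBy]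
  induction files using List.reverseRecOn with
  | nil => simp [pvBucket]
  | append_singleton l x ih =>
      rw [List.foldl_append, List.foldl_cons, List.foldl_nil, ih]
      have hmem : pvGetPriority x ∈ pvK ++ [999] := by
        rcases pvPriority_mem x with h | h
        · simp [h]
        · simp [h]
      rw [pv_flat_insert x (pvGetPriority x) rfl (pvK ++ [999]) hmem pvK_sorted
        (pvBucket l) (fun k _ a ha => by
          have := List.mem_filter.1 ha
          exact of_decide_eq_true this.2)]
      apply flatMap_congr_mem
      intro k _
      unfold pvBucket
      rw [List.filter_append]
      congr 1
      by_cases h : pvGetPriority x = k <;> simp [h]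

-- A equals the ascending concatenation of the non-excluded buckets
lemma pvA_char (files : List (List (String × String))) :
    select_important_files_py files = pvK.flatMap (pvBucket files) := by
  unfold select_important_files_py
  rw [pv_sorted_char, List.flatMap_append, List.filter_append]
  have h1 : (pvK.flatMap (pvBucket files)).filter (fun f => decide (pvGetPriority f < 999))
      = pvK.flatMap (pvBucket files) := by
    rw [List.filter_eq_self]
    intro a ha
    rcases List.mem_flatMap.1 ha with ⟨k, hk, hak⟩
    have hak' := of_decide_eq_true (List.mem_filter.1 hak).2
    have := pvK_lt k hk
    simp only [decide_eq_true_eq]; omega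
  have h2 : (List.flatMap (pvBucket files) [999]).filter (fun f => decide (pvGetPriority f < 999))
      = [] := by
    rw [List.filter_eq_nil_iff]
    intro a ha
    simp only [List.flatMap_cons, List.flatMap_nil, List.append_nil] at ha
    have := of_decide_eq_true (List.mem_filter.1 ha).2
    simp only [decide_eq_true_eq]; omega
  rw [h1, h2, List.append_nil]

-- ---- B side ----

-- structural form of the priority scan: index of the first matching pattern, counting from i
def pvPrioAux : List String → Int → String → Int
  | [], _, _ => 100
  | p :: ps, i, path => if PySem.Str.isIn p path then i else pvPrioAux ps (i + 1) path

lemma pvPrioAux_cons (p : String) (ps : List String) (s : Int) (path : String) :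
    pvPrioAux (p :: ps) s path
      = if PySem.Str.isIn p path = true then s else pvPrioAux ps (s + 1) path := rfl

lemma find_enum_eq_prioAux (ps : List String) (s : Int) (path : String) :
    (match (PySem.List.enumerate ps s).find? (fun p => PySem.Str.isIn p.2 path) with
     | some (i, _) => i
     | none => (100 : Int)) = pvPrioAux ps s path := by
  induction ps generalizing s with
  | nil => simp [PySem.List.enumerate_nil, pvPrioAux]
  | cons p ps ih =>
      rw [PySem.List.enumerate_cons, pvPrioAux_cons]
      cases h : PySem.Str.isIn p path
      · rw [List.find?_cons_of_neg (by simpa [PySem.Str.isIn] using h),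
          if_neg (by simp), ih]
      · rw [List.find?_cons_of_pos (by simpa [PySem.Str.isIn] using h), if_pos rfl]

lemma prioAux_range (ps : List String) (s : Int) (path : String) :
    pvPrioAux ps s path = 100 ∨ (s ≤ pvPrioAux ps s path ∧ pvPrioAux ps s path < s + ps.length) := by
  induction ps generalizing s with
  | nil => exact Or.inl rfl
  | cons p ps ih =>
      rw [pvPrioAux_cons]
      cases h : PySem.Str.isIn p path
      · rw [if_neg (by simp)]
        rcases ih (s + 1) with h' | h'
        · exact Or.inl h'
        · right
          simp only [List.length_cons]
          push_cast
          omega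
      · right
        rw [if_pos rfl]
        simp only [List.length_cons]
        push_cast
        omega

lemma priority_of_not_excl (f : List (String × String)) (h : pvExcl (pvPathOf f) = false) :
    pvGetPriority f = pvPrioAux pvPriorityPatterns 0 (pvPathOf f) := by
  unfold pvGetPriority
  simp only [h, Bool.false_eq_true, if_false]
  exact find_enum_eq_prioAux pvPriorityPatterns 0 (pvPathOf f)

-- the sieve, as a structural recursion on the pattern list (B's outer loop state, out part)
def pvSieveL : List String → List (String × List (String × String)) → List (List (String × String))
  | [], _ => []
  | p :: ps, kept =>
      (kept.filter (fun q => PySem.Str.isIn p q.1)).map (fun q => q.2)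
        ++ pvSieveL ps (kept.filter (fun q => !PySem.Str.isIn p q.1))

-- B's kept-building fold, characterised
lemma kept_fold (files : List (List (String × String))) (acc : List (String × List (String × String))) :
    files.foldl
      (fun ks f =>
        let p := pvPathOf f
        if pvExcl p then ks else ks ++ [(p, f)]) acc
    = acc ++ (files.filter (fun f => !pvExcl (pvPathOf f))).map (fun f => (pvPathOf f, f)) := by
  induction files generalizing acc with
  | nil => simp
  | cons f files ih =>
      by_cases h : pvExcl (pvPathOf f)
      · simp [h, ih]
      · simp [h, ih]

-- B's inner fold (one sieve pass) is a partition
lemma inner_fold (m : (String × List (String × String)) → Bool)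
    (ks : List (String × List (String × String)))
    (a : List (List (String × String))) (b : List (String × List (String × String))) :
    ks.foldl (fun t q => if m q then (t.1 ++ [q.2], t.2) else (t.1, t.2 ++ [q])) (a, b)
    = (a ++ (ks.filter m).map (fun q => q.2), b ++ ks.filter (fun q => !m q)) := by
  induction ks generalizing a b with
  | nil => simp
  | cons q ks ih =>
      by_cases h : m q
      · simp [h, ih]
      · simp [h, ih]

-- B's outer fold, characterised by pvSieveL plus the unclaimed remainder
lemma outer_fold (ps : List String) (out : List (List (String × String)))
    (kept : List (String × List (String × String))) :
    ps.foldl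
      (fun (s : List (List (String × String)) × List (String × List (String × String))) pat =>
        let t := s.2.foldl
          (fun (t : List (List (String × String)) × List (String × List (String × String))) q =>
            if PySem.Str.isIn pat q.1 then (t.1 ++ [q.2], t.2) else (t.1, t.2 ++ [q]))
          ([], [])
        (s.1 ++ t.1, t.2)) (out, kept)
    = (out ++ pvSieveL ps kept, kept.filter (fun q => ps.all (fun p => !PySem.Str.isIn p q.1))) := by
  induction ps generalizing out kept with
  | nil => simp [pvSieveL]
  | cons p ps ih =>
      rw [List.foldl_cons]
      dsimp only
      rw [inner_fold, List.nil_append, List.nil_append, ih]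
      simp only [Prod.mk.injEq]
      constructor
      · rw [pvSieveL, List.append_assoc]
      · rw [List.filter_filter]
        apply List.filter_congr
        intro q _
        simp [Bool.and_comm]

-- the sieve's output plus its remainder, read off bucket by bucket
def pvBucketP (ps : List String) (s k : Int) (kept : List (String × List (String × String))) :
    List (List (String × String)) :=
  (kept.filter (fun q => pvPrioAux ps s q.1 == k)).map (fun q => q.2)

lemma sieve_flat (ps : List String) (s : Int) (kept : List (String × List (String × String)))
    (hs : 0 ≤ s) (hlen : s + ps.length ≤ 100) :
    pvSieveL ps kept
        ++ (kept.filter (fun q => ps.all (fun p => !PySem.Str.isIn p q.1))).map (fun q => q.2)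
    = (PySem.List.pyRange s (s + ps.length) 1 ++ [100]).flatMap
        (fun k => pvBucketP ps s k kept) := by
  induction ps generalizing s kept with
  | nil =>
      have h0 : PySem.List.pyRange s (s + ([] : List String).length) 1 = [] := by
        rw [List.eq_nil_iff_forall_not_mem]
        intro k hk
        have hm := PySem.List.mem_pyRange_one.1 hk
        simp at hm
        omega
      rw [h0, List.nil_append, List.flatMap_cons, List.flatMap_nil, List.append_nil]
      simp [pvSieveL, pvBucketP, pvPrioAux]
  | cons p ps ih =>
      have hlen' : s + (ps.length : Int) + 1 ≤ 100 := by
        simp only [List.length_cons] at hlen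
        push_cast at hlen
        omega
      have hcons : PySem.List.pyRange s (s + (p :: ps).length) 1
          = s :: PySem.List.pyRange (s + 1) (s + 1 + ps.length) 1 := by
        have harith : s + ((p :: ps).length : Int) = s + 1 + ps.length := by
          simp only [List.length_cons]
          push_cast
          omega
        rw [PySem.List.pyRange_one_cons (by simp only [List.length_cons]; push_cast; omega), harith]
      rw [hcons, List.cons_append, List.flatMap_cons]
      have hbs : pvBucketP (p :: ps) s s kept
          = (kept.filter (fun q => PySem.Str.isIn p q.1)).map (fun q => q.2) := by
        unfold pvBucketP
        congr 1
        apply List.filter_congr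
        intro q _
        rw [pvPrioAux_cons]
        cases h : PySem.Str.isIn p q.1
        · rw [if_neg (by simp)]
          have hne : pvPrioAux ps (s + 1) q.1 ≠ s := by
            rcases prioAux_range ps (s + 1) q.1 with h' | h' <;> omega
          simp [hne]
        · rw [if_pos rfl]
          simp
      have htail : (PySem.List.pyRange (s + 1) (s + 1 + ps.length) 1 ++ [100]).flatMap
            (fun k => pvBucketP (p :: ps) s k kept)
          = (PySem.List.pyRange (s + 1) (s + 1 + ps.length) 1 ++ [100]).flatMap
            (fun k => pvBucketP ps (s + 1) k (kept.filter (fun q => !PySem.Str.isIn p q.1))) := by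
        apply flatMap_congr_mem
        intro k hk
        have hks : k ≠ s := by
          rcases List.mem_append.1 hk with h | h
          · have := PySem.List.mem_pyRange_one.1 h; omega
          · simp at h; omega
        unfold pvBucketP
        congr 1
        rw [List.filter_filter]
        apply List.filter_congr
        intro q _
        rw [pvPrioAux_cons]
        cases h : PySem.Str.isIn p q.1
        · rw [if_neg (by simp)]
          simp
        · rw [if_pos rfl]
          simp [Ne.symm hks]
      rw [htail, ← ih (s + 1) (kept.filter (fun q => !PySem.Str.isIn p q.1)) (by omega) (by omega)]
      rw [pvSieveL, List.append_assoc, hbs]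
      have hleft : kept.filter (fun q => (p :: ps).all (fun p' => !PySem.Str.isIn p' q.1))
          = (kept.filter (fun q => !PySem.Str.isIn p q.1)).filter
              (fun q => ps.all (fun p' => !PySem.Str.isIn p' q.1)) := by
        rw [List.filter_filter]
        apply List.filter_congr
        intro q _
        simp [Bool.and_comm]
      rw [hleft]

-- B equals the ascending concatenation of the non-excluded buckets
lemma pvB_char (files : List (List (String × String))) :
    select_important_files_py_alt files = pvK.flatMap (pvBucket files) := by
  simp only [select_important_files_py_alt]
  rw [kept_fold, List.nil_append, outer_fold, List.nil_append]
  have hflat := sieve_flat pvPriorityPatterns 0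
    ((files.filter (fun f => !pvExcl (pvPathOf f))).map (fun f => (pvPathOf f, f)))
    (by omega) (by simp [pvPriorityPatterns])
  rw [hflat]
  have h21 : ((0 : Int) + (pvPriorityPatterns.length : Int)) = Int.ofNat pvPriorityPatterns.length := by
    simp
  rw [h21]
  unfold pvK
  apply flatMap_congr_mem
  intro k hk
  have hk999 : k ≠ 999 := by
    have := pvK_lt k (by unfold pvK; exact hk)
    omega
  unfold pvBucketP
  rw [List.filter_map, List.map_map]
  rw [show ((fun q : String × List (String × String) => q.2) ∘
        fun f : List (String × String) => (pvPathOf f, f)) = id from rfl, List.map_id]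
  unfold pvBucket
  rw [List.filter_filter]
  apply List.filter_congr
  intro f _
  cases h : pvExcl (pvPathOf f)
  · have hp := priority_of_not_excl f h
    by_cases hq : pvGetPriority f = k
    · simp [Function.comp, hp ▸ hq, hq]
    · have : pvPrioAux pvPriorityPatterns 0 (pvPathOf f) ≠ k := by rw [← hp]; exact hq
      simp [Function.comp, this, hq]
  · have h999 : pvGetPriority f = 999 := by
      unfold pvGetPriority
      simp [h]
    simp [Function.comp, h999]
    omega

-- ===== VERDICT (by name: the statement is the Claim_ definition above) =====
theorem select_important_files_py_spec : Claim_equal_select_important_files_py := by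
  intro files _
  unfold Spec_select_important_files_py
  rw [pvA_char, pvB_char]
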